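-- pv_equiv track=rewrite | github.com/nnelson16/AI_Project_3 | Problem_5/helpers.py | get_sequence_bounds
-- ===== SOURCE A (Python) =====
-- def get_sequence_bounds(sequence):
-- 	y_max, x_max, x_min, y_min = None, None, None, None
-- 	for x,y in sequence:
-- 		if x_max==None: x_max = x
-- 		if x_min==None: x_min = x
-- 		if y_max==None: y_max = y
-- 		if y_min==None: y_min = y
--
-- 		if x<x_min: x_min = x
-- 		if x>x_max: x_max = x
-- 		if y<y_min: y_min = y
-- 		if y>y_max: y_max = y
-- 	return x_max,y_max,x_min,y_min
-- ===== SOURCE B (Python) =====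
-- def get_sequence_bounds(sequence):
--     pts = list(sequence)
--     if not pts:
--         return None, None, None, None
--     return (max(x for x, y in pts),
--             max(y for x, y in pts),
--             min(x for x, y in pts),
--             min(y for x, y in pts))
-- ===== Notes on version B (the rewrite author's own statement) =====
-- stated objective: simpler
-- what changed: Replaces the fused loop with None-filling and eight branch comparisons by an empty-list guard plus four separate library min/max scans over the projected coordinates.
import Mathlib
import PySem

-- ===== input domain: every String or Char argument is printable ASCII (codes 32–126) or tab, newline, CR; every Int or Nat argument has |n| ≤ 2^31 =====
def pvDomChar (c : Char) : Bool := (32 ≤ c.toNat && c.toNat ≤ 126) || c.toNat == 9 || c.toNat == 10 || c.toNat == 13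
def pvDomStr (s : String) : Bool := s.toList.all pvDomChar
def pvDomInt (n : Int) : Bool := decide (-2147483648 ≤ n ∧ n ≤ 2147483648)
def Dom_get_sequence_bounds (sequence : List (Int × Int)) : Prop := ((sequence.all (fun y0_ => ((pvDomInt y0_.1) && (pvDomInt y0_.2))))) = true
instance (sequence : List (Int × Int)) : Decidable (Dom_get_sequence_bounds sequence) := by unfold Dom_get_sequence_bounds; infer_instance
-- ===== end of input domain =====

-- B replaces A's fused comparison loop by an empty-list guard plus four separate min/max scans (objective: simpler).


-- ===== PORT A =====
-- Loop body of A: state is (y_max, x_max, x_min, y_min), exactly A's variable set.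
def pvStepA (s : Option Int × Option Int × Option Int × Option Int) (p : Int × Int) :
    Option Int × Option Int × Option Int × Option Int :=
  let (y_max0, x_max0, x_min0, y_min0) := s
  let (x, y) := p
  let x_max1 := if x_max0 = none then some x else x_max0
  let x_min1 := if x_min0 = none then some x else x_min0
  let y_max1 := if y_max0 = none then some y else y_max0
  let y_min1 := if y_min0 = none then some y else y_min0
  let x_min2 := match x_min1 with | some v => if x < v then some x else some v | none => none
  let x_max2 := match x_max1 with | some v => if x > v then some x else some v | none => none
  let y_min2 := match y_min1 with | some v => if y < v then some y else some v | none => none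
  let y_max2 := match y_max1 with | some v => if y > v then some y else some v | none => none
  (y_max2, x_max2, x_min2, y_min2)

def get_sequence_bounds (sequence : List (Int × Int)) : Option Int × Option Int × Option Int × Option Int :=
  let s := sequence.foldl pvStepA (none, none, none, none)
  (s.2.1, s.1, s.2.2.1, s.2.2.2)

-- ===== PORT B =====
-- B: empty guard, then four separate min/max scans over the projected coordinates.
def get_sequence_bounds_alt (sequence : List (Int × Int)) : Option Int × Option Int × Option Int × Option Int :=
  if sequence = [] then (none, none, none, none)
  else
    let xs := sequence.map Prod.fst
    let ys := sequence.map Prod.snd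
    (PySem.List.max? xs (fun v => v), PySem.List.max? ys (fun v => v),
     PySem.List.min? xs (fun v => v), PySem.List.min? ys (fun v => v))

-- ===== PRECONDITION & SPEC =====
def Spec_get_sequence_bounds (sequence : List (Int × Int)) (out : Option Int × Option Int × Option Int × Option Int) : Prop := out = get_sequence_bounds_alt sequence
instance (sequence : List (Int × Int)) (out : Option Int × Option Int × Option Int × Option Int) : Decidable (Spec_get_sequence_bounds sequence out) := by unfold Spec_get_sequence_bounds; infer_instance

-- ===== CLAIM (what is proved, stated in full; the proofs are below) =====
def Claim_equal_get_sequence_bounds : Prop := ∀ (sequence : List (Int × Int)), Dom_get_sequence_bounds sequence → Spec_get_sequence_bounds sequence (get_sequence_bounds sequence)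

-- ===== LEMMAS AND PROOFS =====

theorem pvStep_some (a b c d x y : Int) :
    pvStepA (some a, some b, some c, some d) (x, y) =
      (some (max a y), some (max b x), some (min c x), some (min d y)) := by
  simp only [pvStepA]
  have h1 : max a y = if y > a then y else a := by rw [max_def]; split_ifs <;> omega
  have h2 : max b x = if x > b then x else b := by rw [max_def]; split_ifs <;> omega
  have h3 : min c x = if x < c then x else c := by rw [min_def]; split_ifs <;> omega
  have h4 : min d y = if y < d then y else d := by rw [min_def]; split_ifs <;> omega
  simp only [h1, h2, h3, h4]
  split_ifs <;> simp_all

theorem pvStep_none (x y : Int) :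
    pvStepA (none, none, none, none) (x, y) = (some y, some x, some x, some y) := by
  simp [pvStepA]

-- after the first point A's state is four 'some' running extrema; this characterises the rest of the fold
theorem pvFoldA_some (l : List (Int × Int)) : ∀ (a b c d : Int),
    l.foldl pvStepA (some a, some b, some c, some d) =
      (some (l.foldl (fun acc p => max acc p.2) a),
       some (l.foldl (fun acc p => max acc p.1) b),
       some (l.foldl (fun acc p => min acc p.1) c),
       some (l.foldl (fun acc p => min acc p.2) d)) := by
  induction l with
  | nil => intro a b c d; rfl
  | cons p t ih =>
    intro a b c d
    obtain ⟨x, y⟩ := p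
    rw [List.foldl_cons, pvStep_some, ih]
    rfl

-- ===== VERDICT (by name: the statement is the Claim_ definition above) =====
theorem get_sequence_bounds_spec : Claim_equal_get_sequence_bounds := by
  intro sequence _
  unfold Spec_get_sequence_bounds get_sequence_bounds get_sequence_bounds_alt
  cases sequence with
  | nil => rfl
  | cons p t =>
    obtain ⟨x, y⟩ := p
    simp only [List.foldl_cons, List.map_cons, if_neg (List.cons_ne_nil _ _)]
    rw [pvStep_none, pvFoldA_some]
    rw [PySem.List.max?_id_cons, PySem.List.max?_id_cons, PySem.List.min?_id_cons, PySem.List.min?_id_cons]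
    simp [List.foldl_map]
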